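-- pv_equiv track=rewrite | github.com/JReal2/MuseScan | yolo_detection/midi_extract.py | cluster_staff_lines
-- ===== SOURCE A (Python) =====
-- def cluster_staff_lines(y_positions, group_size=5, threshold=12):
--     blocks, current = [], [y_positions[0]]
--     for y in y_positions[1:]:
--         if abs(y - current[-1]) <= threshold:
--             current.append(y)
--         else:
--             if len(current) >= group_size:
--                 blocks.append(current[:group_size])
--             current = [y]
--     if len(current) >= group_size:
--         blocks.append(current[:group_size])
--     return blocks
-- ===== SOURCE B (Python) =====
-- def cluster_staff_lines(y_positions, group_size=5, threshold=12):
--     # Boundary-index algorithm: find the cut indices where the gap between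
--     # adjacent y-values exceeds the threshold, slice the list at those cuts,
--     # then keep and truncate the long-enough slices.
--     n = len(y_positions)
--     cuts = [0] + [i for i in range(1, n) if abs(y_positions[i] - y_positions[i-1]) > threshold] + [n]
--     segs = [y_positions[a:b] for a, b in zip(cuts, cuts[1:])]
--     return [s[:group_size] for s in segs if len(s) >= group_size]
-- ===== Notes on version B (the rewrite author's own statement) =====
-- stated objective: alternative
-- what changed: B never accumulates runs element by element: it computes the list of cut indices (positions where adjacent y-values differ by more than the threshold) with index arithmetic over range(1, n), reconstructs the segments by slicing the original list between consecutive cuts, and filters/truncates the slices; A maintains a growing 'current' run and flushes it inside the loop.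
-- outside the precondition, e.g. on cluster_staff_lines([], 5, 12): A raises IndexError, B returns []
import Mathlib
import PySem

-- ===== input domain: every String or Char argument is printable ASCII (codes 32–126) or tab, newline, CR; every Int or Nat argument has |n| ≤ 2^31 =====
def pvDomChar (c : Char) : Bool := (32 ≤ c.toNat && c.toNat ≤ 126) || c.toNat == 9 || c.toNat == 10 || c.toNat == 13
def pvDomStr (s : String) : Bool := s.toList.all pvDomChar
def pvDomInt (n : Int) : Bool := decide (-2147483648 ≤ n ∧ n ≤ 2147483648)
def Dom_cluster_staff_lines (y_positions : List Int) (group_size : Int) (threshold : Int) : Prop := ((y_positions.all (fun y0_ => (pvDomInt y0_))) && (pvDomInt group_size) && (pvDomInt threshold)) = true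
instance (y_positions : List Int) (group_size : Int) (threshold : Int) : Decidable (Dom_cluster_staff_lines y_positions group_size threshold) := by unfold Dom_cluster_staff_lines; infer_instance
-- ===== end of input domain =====

-- B replaces A's element-by-element run accumulation by a boundary-index algorithm:
-- compute the cut indices where adjacent y-values differ by more than the threshold,
-- slice the list between consecutive cuts, then filter/truncate (objective: alternative).

-- ===== PORT A =====
-- loop body of A: extend current run, or flush it (filtered/truncated) and restart
def pvStepA (group_size threshold : Int) (st : List (List Int) × List Int) (y : Int) : List (List Int) × List Int :=
  if |y - st.2.getLastD 0| ≤ threshold then (st.1, st.2 ++ [y])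
  else (if group_size ≤ (st.2.length : Int) then st.1 ++ [PySem.List.slice st.2 none (some group_size)] else st.1, [y])

-- A's trailing flush after the loop
def pvFinA (group_size : Int) (st : List (List Int) × List Int) : List (List Int) :=
  if group_size ≤ (st.2.length : Int) then st.1 ++ [PySem.List.slice st.2 none (some group_size)] else st.1

def cluster_staff_lines (y_positions : List Int) (group_size : Int) (threshold : Int) : List (List Int) :=
  match y_positions with
  | [] => []   -- Python raises IndexError on y_positions[0]; excluded by Pre_
  | y0 :: rest => pvFinA group_size (rest.foldl (pvStepA group_size threshold) ([], [y0]))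

-- ===== PORT B =====
-- [i for i in range(1, n) if abs(y_positions[i] - y_positions[i-1]) > threshold]
-- (both indices are always in range, so pyGetD's default is never used)
def pvBreaks (ys : List Int) (threshold : Int) : List Int :=
  (PySem.List.pyRange 1 (ys.length : Int) 1).filter
    (fun i => decide (threshold < |PySem.List.pyGetD ys i 0 - PySem.List.pyGetD ys (i - 1) 0|))

-- cuts = [0] + breaks + [n]
def pvCuts (ys : List Int) (threshold : Int) : List Int :=
  [0] ++ pvBreaks ys threshold ++ [(ys.length : Int)]

-- segs = [y_positions[a:b] for a, b in zip(cuts, cuts[1:])]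
def pvSegs (ys : List Int) (threshold : Int) : List (List Int) :=
  ((pvCuts ys threshold).zip (pvCuts ys threshold).tail).map
    (fun p => PySem.List.slice ys (some p.1) (some p.2))

-- [s[:group_size] for s in segs if len(s) >= group_size]
def pvEmitB (group_size : Int) (segs : List (List Int)) : List (List Int) :=
  (segs.filter (fun s => decide (group_size ≤ (s.length : Int)))).map
    (fun s => PySem.List.slice s none (some group_size))

def cluster_staff_lines_alt (y_positions : List Int) (group_size : Int) (threshold : Int) : List (List Int) :=
  pvEmitB group_size (pvSegs y_positions threshold)

-- ===== PRECONDITION & SPEC =====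
-- Pre_ excludes only the empty list, on which Python A raises IndexError.
def Pre_cluster_staff_lines (y_positions : List Int) (group_size : Int) (threshold : Int) : Prop :=
  y_positions ≠ []
instance (y_positions : List Int) (group_size : Int) (threshold : Int) : Decidable (Pre_cluster_staff_lines y_positions group_size threshold) := by unfold Pre_cluster_staff_lines; infer_instance

def pvWitness_cluster_staff_lines : List Int × Int × Int := ([10, 12, 13, 14, 15, 40], 5, 12)

def Spec_cluster_staff_lines (y_positions : List Int) (group_size : Int) (threshold : Int) (out : List (List Int)) : Prop := out = cluster_staff_lines_alt y_positions group_size threshold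
instance (y_positions : List Int) (group_size : Int) (threshold : Int) (out : List (List Int)) : Decidable (Spec_cluster_staff_lines y_positions group_size threshold out) := by unfold Spec_cluster_staff_lines; infer_instance

-- ===== CLAIM (what is proved, stated in full; the proofs are below) =====
def Claim_equal_cluster_staff_lines : Prop := ∀ (y_positions : List Int) (group_size : Int) (threshold : Int), Dom_cluster_staff_lines y_positions group_size threshold → Pre_cluster_staff_lines y_positions group_size threshold → Spec_cluster_staff_lines y_positions group_size threshold (cluster_staff_lines y_positions group_size threshold)

-- ===== LEMMAS AND PROOFS =====

-- the common semantic skeleton: the maximal runs of threshold-close values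
def pvRuns (th : Int) : List Int → List (List Int)
  | [] => []
  | [x] => [[x]]
  | x :: y :: t =>
    match pvRuns th (y :: t) with
    | [] => [[x]]
    | r :: rs => if |y - x| ≤ th then (x :: r) :: rs else [x] :: r :: rs

def pvMapHead (f : List Int → List Int) : List (List Int) → List (List Int)
  | [] => []
  | r :: rs => f r :: rs

theorem pvRuns_ne_nil (th x : Int) (t : List Int) : pvRuns th (x :: t) ≠ [] := by
  cases t with
  | nil => simp [pvRuns]
  | cons y t =>
    unfold pvRuns
    cases h : pvRuns th (y :: t) with
    | nil => simp
    | cons r rs => split_ifs <;> simp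

theorem pvEmitB_append (gs : Int) (l₁ l₂ : List (List Int)) :
    pvEmitB gs (l₁ ++ l₂) = pvEmitB gs l₁ ++ pvEmitB gs l₂ := by
  simp [pvEmitB]

theorem dropLast_append_getLastD (c : List Int) (hc : c ≠ []) :
    c.dropLast ++ [c.getLastD 0] = c := by
  rw [List.getLastD_eq_getLast?, List.getLast?_eq_some_getLast hc]
  simpa using List.dropLast_append_getLast hc

theorem pvMapHead_id (l : List (List Int)) : pvMapHead (fun r => r) l = l := by
  cases l <;> simp [pvMapHead]

-- A's loop-with-flush equals blocks-so-far ++ emit of the runs (head run glued onto c)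
theorem pv_mainA (gs th : Int) (rest : List Int) :
    ∀ (b : List (List Int)) (c : List Int), c ≠ [] →
      pvFinA gs (rest.foldl (pvStepA gs th) (b, c))
        = b ++ pvEmitB gs (pvMapHead (fun r => c.dropLast ++ r) (pvRuns th (c.getLastD 0 :: rest))) := by
  induction rest with
  | nil =>
    intro b c hc
    simp only [List.foldl_nil, pvRuns, pvMapHead, dropLast_append_getLastD c hc, pvFinA, pvEmitB]
    split_ifs with h <;> simp [List.filter, h]
  | cons y rest ih =>
    intro b c hc
    simp only [List.foldl_cons, pvStepA]
    obtain ⟨r, rs, hr⟩ : ∃ r rs, pvRuns th (y :: rest) = r :: rs := by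
      cases h : pvRuns th (y :: rest) with
      | nil => exact absurd h (pvRuns_ne_nil th y rest)
      | cons r rs => exact ⟨r, rs, rfl⟩
    have hruns : pvRuns th (c.getLastD 0 :: y :: rest)
        = if |y - c.getLastD 0| ≤ th then (c.getLastD 0 :: r) :: rs
          else [c.getLastD 0] :: r :: rs := by
      unfold pvRuns; rw [hr]
    by_cases hclose : |y - c.getLastD 0| ≤ th
    · simp only [if_pos hclose]
      rw [ih b (c ++ [y]) (by simp)]
      rw [hruns, if_pos hclose]
      simp only [List.dropLast_concat, List.getLastD_concat, hr, pvMapHead]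
      have hglue : c.dropLast ++ c.getLastD 0 :: r = c ++ r := by
        conv_rhs => rw [← dropLast_append_getLastD c hc]
        simp
      rw [hglue]
    · simp only [if_neg hclose]
      rw [hruns, if_neg hclose, ih _ [y] (by simp)]
      have hflush : (if gs ≤ (c.length : Int) then b ++ [PySem.List.slice c none (some gs)] else b)
          = b ++ pvEmitB gs [c] := by
        split_ifs with h <;> simp [pvEmitB, List.filter, h]
      rw [hflush]
      simp only [show ([y] : List Int).getLastD 0 = y from rfl,
        show ([y] : List Int).dropLast = ([] : List Int) from rfl, hr]
      simp only [pvMapHead, List.nil_append, dropLast_append_getLastD c hc]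
      rw [show (c :: r :: rs) = [c] ++ (r :: rs) from rfl, pvEmitB_append, List.append_assoc]

-- index shift for pyGetD on a cons cell
theorem pvShiftGet (x d : Int) (tl : List Int) (i : Int) (hi : 0 ≤ i) :
    PySem.List.pyGetD (x :: tl) (i + 1) d = PySem.List.pyGetD tl i d := by
  obtain ⟨k, rfl⟩ := Int.eq_ofNat_of_zero_le hi
  have h1 : (k : Int) + 1 = ((k + 1 : Nat) : Int) := by push_cast; ring
  rw [h1, PySem.List.pyGetD_natCast, PySem.List.pyGetD_natCast]
  rfl

-- index shift for a nonnegative slice on a cons cell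
theorem pvShiftSlice (x : Int) (tl : List Int) (a b : Int) (ha : 0 ≤ a) (hb : 0 ≤ b) :
    PySem.List.slice (x :: tl) (some (a + 1)) (some (b + 1)) = PySem.List.slice tl (some a) (some b) := by
  rw [PySem.List.slice_toNat _ (by omega) (by omega), PySem.List.slice_toNat _ ha hb]
  have h1 : (a + 1).toNat = a.toNat + 1 := by omega
  have h2 : (b + 1).toNat = b.toNat + 1 := by omega
  rw [h1, h2, List.drop_succ_cons]
  congr 1
  omega

theorem pvBreaks_nonneg (ys : List Int) (th : Int) :
    ∀ i ∈ pvBreaks ys th, 1 ≤ i := by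
  intro i hi
  have := List.mem_of_mem_filter hi
  exact (PySem.List.mem_pyRange_one.mp this).1

-- breaks of x :: tl are the (possible) break at index 1 plus tl's breaks shifted by one
theorem pvBreaks_cons (x th : Int) (y : Int) (t : List Int) :
    pvBreaks (x :: y :: t) th
      = (if th < |y - x| then [1] else []) ++ (pvBreaks (y :: t) th).map (· + 1) := by
  unfold pvBreaks
  have hlen : ((x :: y :: t).length : Int) = ((y :: t).length : Int) + 1 := by simp
  rw [hlen]
  have hn : (1 : Int) < ((y :: t).length : Int) + 1 := by
    have hl : ((y :: t).length : Int) = (t.length : Int) + 1 := by push_cast [List.length_cons]; ring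
    rw [hl]; omega
  rw [PySem.List.pyRange_one_cons hn]
  have h12 : (1 : Int) + 1 = 2 := by norm_num
  rw [h12]
  have hshift : PySem.List.pyRange 2 (((y :: t).length : Int) + 1) 1
      = (PySem.List.pyRange 1 ((y :: t).length : Int) 1).map (· + 1) := by
    rw [PySem.List.pyRange_one, PySem.List.pyRange_one, List.map_map]
    have he : ((((y :: t).length : Int) + 1) - 2).toNat = (((y :: t).length : Int) - 1).toNat := by omega
    rw [he]
    apply List.map_congr_left
    intro k _
    simp only [Function.comp]
    omega
  rw [hshift, List.filter_cons, List.filter_map]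
  have hhead : (decide (th < |PySem.List.pyGetD (x :: y :: t) 1 0 - PySem.List.pyGetD (x :: y :: t) (1 - 1) 0|))
      = decide (th < |y - x|) := by
    have h0 : PySem.List.pyGetD (x :: y :: t) 1 0 = y := by
      have := pvShiftGet x 0 (y :: t) 0 le_rfl
      simpa [PySem.List.pyGetD_zero_cons] using this
    have h1 : PySem.List.pyGetD (x :: y :: t) (1 - 1) 0 = x := by
      norm_num [PySem.List.pyGetD_zero_cons]
    rw [h0, h1]
  have hbody : ∀ i ∈ PySem.List.pyRange 1 ((y :: t).length : Int) 1,
      (decide (th < |PySem.List.pyGetD (x :: y :: t) (i + 1) 0 - PySem.List.pyGetD (x :: y :: t) (i + 1 - 1) 0|))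
        = decide (th < |PySem.List.pyGetD (y :: t) i 0 - PySem.List.pyGetD (y :: t) (i - 1) 0|) := by
    intro i hi
    have h1 : 1 ≤ i := (PySem.List.mem_pyRange_one.mp hi).1
    have e1 : PySem.List.pyGetD (x :: y :: t) (i + 1) 0 = PySem.List.pyGetD (y :: t) i 0 :=
      pvShiftGet x 0 (y :: t) i (by omega)
    have e2 : PySem.List.pyGetD (x :: y :: t) (i + 1 - 1) 0 = PySem.List.pyGetD (y :: t) (i - 1) 0 := by
      have : i + 1 - 1 = (i - 1) + 1 := by ring
      rw [this]
      exact pvShiftGet x 0 (y :: t) (i - 1) (by omega)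
    rw [e1, e2]
  simp only [Function.comp_def]
  rw [List.filter_congr hbody, hhead]
  by_cases h : th < |y - x|
  · simp [h]
  · simp [h]

-- slicing x :: tl at shifted cut pairs is slicing tl at the original pairs
theorem pvShiftSlices (x : Int) (tl : List Int) (L : List (Int × Int))
    (hL : ∀ p ∈ L, 0 ≤ p.1 ∧ 0 ≤ p.2) :
    (L.map (Prod.map (· + 1) (· + 1))).map (fun p => PySem.List.slice (x :: tl) (some p.1) (some p.2))
      = L.map (fun p => PySem.List.slice tl (some p.1) (some p.2)) := by
  rw [List.map_map]
  apply List.map_congr_left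
  intro p hp
  obtain ⟨h1, h2⟩ := hL p hp
  simp only [Function.comp, Prod.map]
  exact pvShiftSlice x tl p.1 p.2 h1 h2

-- the segment comprehension satisfies the same recurrence as the runs
theorem pvSegs_cons (th x y : Int) (t : List Int) :
    pvSegs (x :: y :: t) th
      = if th < |y - x| then [x] :: pvSegs (y :: t) th
        else pvMapHead (fun r => x :: r) (pvSegs (y :: t) th) := by
  have hnn : ∀ i ∈ pvBreaks (y :: t) th ++ [((y :: t).length : Int)], 0 ≤ i := by
    intro i hi
    rcases List.mem_append.mp hi with h | h
    · have := pvBreaks_nonneg (y :: t) th i h; omega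
    · simp at h; omega
  obtain ⟨b0, bs', hbs⟩ : ∃ b0 bs', pvBreaks (y :: t) th ++ [((y :: t).length : Int)] = b0 :: bs' := by
    cases h : pvBreaks (y :: t) th ++ [((y :: t).length : Int)] with
    | nil => simp at h
    | cons b0 bs' => exact ⟨b0, bs', rfl⟩
  have hzip : ∀ u v : List Int, List.zip (u.map (· + 1)) (v.map (· + 1)) = (List.zip u v).map (Prod.map (· + 1) (· + 1)) := by
    intro u v; rw [List.zip_map]
  have hmemzip : ∀ (u v : List Int), (∀ i ∈ u, 0 ≤ i) → (∀ i ∈ v, 0 ≤ i) →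
      ∀ p ∈ List.zip u v, 0 ≤ p.1 ∧ 0 ≤ p.2 := by
    intro u v hu hv p hp
    obtain ⟨hp1, hp2⟩ := List.of_mem_zip hp
    exact ⟨hu _ hp1, hv _ hp2⟩
  have hlen : ((x :: y :: t).length : Int) = ((y :: t).length : Int) + 1 := by simp
  have hb0 : 0 ≤ b0 := hnn b0 (by rw [hbs]; exact List.mem_cons_self ..)
  have hbs'nn : ∀ i ∈ bs', 0 ≤ i := fun i hi => hnn i (by rw [hbs]; exact List.mem_cons_of_mem _ hi)
  have hsegs_tl : pvSegs (y :: t) th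
      = PySem.List.slice (y :: t) (some 0) (some b0)
          :: (List.zip (b0 :: bs') bs').map (fun p => PySem.List.slice (y :: t) (some p.1) (some p.2)) := by
    simp only [pvSegs, pvCuts, List.cons_append, List.nil_append, hbs, List.tail_cons, List.zip_cons_cons, List.map_cons]
  by_cases hgap : th < |y - x|
  · -- a break at index 1: the head run is [x], the rest is tl's segments shifted
    rw [if_pos hgap]
    simp only [pvSegs, pvCuts, pvBreaks_cons x th y t, if_pos hgap, hlen, hbs,
      List.cons_append, List.nil_append, List.tail_cons]
    have hmap : ((pvBreaks (y :: t) th).map (· + 1)) ++ [((y :: t).length : Int) + 1]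
        = ((pvBreaks (y :: t) th ++ [((y :: t).length : Int)]).map (· + 1)) := by
      simp
    rw [hmap, hbs]
    simp only [List.map_cons, List.zip_cons_cons, List.map_cons]
    have h1 : PySem.List.slice (x :: y :: t) (some 0) (some 1) = [x] := by
      rw [PySem.List.slice_zero_start, PySem.List.slice_to _ (by omega)]
      rfl
    have h2 : PySem.List.slice (x :: y :: t) (some 1) (some (b0 + 1))
        = PySem.List.slice (y :: t) (some 0) (some b0) := by
      have := pvShiftSlice x (y :: t) 0 b0 le_rfl hb0
      simpa using this
    have hrest : ((b0 + 1) :: bs'.map (· + 1)).zip (bs'.map (· + 1))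
        = ((b0 :: bs').zip bs').map (Prod.map (· + 1) (· + 1)) := by
      have : ((b0 + 1) :: bs'.map (· + 1)) = (b0 :: bs').map (· + 1) := by simp
      rw [this, hzip]
    rw [h1, h2, hrest, pvShiftSlices x (y :: t) _ (hmemzip _ _ (by
        intro i hi
        rcases List.mem_cons.mp hi with h | h
        · omega
        · exact hbs'nn i h) hbs'nn)]
  · -- no break at index 1: x is glued onto the head segment
    rw [if_neg hgap]
    simp only [pvSegs, pvCuts, pvBreaks_cons x th y t, if_neg hgap, hlen,
      List.cons_append, List.nil_append, List.tail_cons]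
    have hmap : ((pvBreaks (y :: t) th).map (· + 1)) ++ [((y :: t).length : Int) + 1]
        = ((pvBreaks (y :: t) th ++ [((y :: t).length : Int)]).map (· + 1)) := by
      simp
    rw [hmap, hbs]
    simp only [List.map_cons, List.zip_cons_cons, List.map_cons]
    have hhead : PySem.List.slice (x :: y :: t) (some 0) (some (b0 + 1))
        = x :: PySem.List.slice (y :: t) (some 0) (some b0) := by
      rw [PySem.List.slice_zero_start, PySem.List.slice_zero_start,
        PySem.List.slice_to _ (by omega), PySem.List.slice_to _ hb0]
      have : (b0 + 1).toNat = b0.toNat + 1 := by omega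
      rw [this, List.take_succ_cons]
    have hrest : List.zip ((b0 + 1) :: bs'.map (· + 1)) (bs'.map (· + 1))
        = (List.zip (b0 :: bs') bs').map (Prod.map (· + 1) (· + 1)) := by
      have : ((b0 + 1) :: bs'.map (· + 1)) = (b0 :: bs').map (· + 1) := by simp
      rw [this, hzip]
    rw [hhead, hrest, pvShiftSlices x (y :: t) _ (hmemzip _ _ (by
        intro i hi
        rcases List.mem_cons.mp hi with h | h
        · omega
        · exact hbs'nn i h) hbs'nn)]
    simp [pvMapHead]

theorem pvSegs_eq_runs (th : Int) : ∀ ys : List Int, ys ≠ [] → pvSegs ys th = pvRuns th ys := by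
  intro ys
  induction ys with
  | nil => intro h; exact absurd rfl h
  | cons x tl ih =>
    intro _
    cases tl with
    | nil =>
      simp only [pvSegs, pvCuts, pvBreaks, pvRuns]
      rw [PySem.List.pyRange_one_eq_nil (by simp)]
      simp [PySem.List.slice_to]
    | cons y t =>
      rw [pvSegs_cons th x y t, ih (by simp)]
      obtain ⟨r, rs, hr⟩ : ∃ r rs, pvRuns th (y :: t) = r :: rs := by
        cases h : pvRuns th (y :: t) with
        | nil => exact absurd h (pvRuns_ne_nil th y t)
        | cons r rs => exact ⟨r, rs, rfl⟩
      have hstep : pvRuns th (x :: y :: t)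
          = if |y - x| ≤ th then (x :: r) :: rs else [x] :: r :: rs := by
        simp only [pvRuns, hr]
      rw [hr, hstep]
      by_cases h : |y - x| ≤ th
      · rw [if_pos h, if_neg (not_lt.mpr h)]
        simp [pvMapHead]
      · rw [if_neg h, if_pos (not_le.mp h)]

-- ===== VERDICT (by name: the statements are the Claim_ definitions above) =====
theorem cluster_staff_lines_spec : Claim_equal_cluster_staff_lines := by
  intro ys gs th _ hpre
  unfold Spec_cluster_staff_lines
  match ys with
  | [] => exact absurd rfl hpre
  | y0 :: rest =>
    show pvFinA gs (rest.foldl (pvStepA gs th) ([], [y0]))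
        = cluster_staff_lines_alt (y0 :: rest) gs th
    rw [pv_mainA gs th rest [] [y0] (by simp)]
    unfold cluster_staff_lines_alt
    rw [pvSegs_eq_runs th (y0 :: rest) (by simp)]
    simp only [show ([y0] : List Int).dropLast = ([] : List Int) from rfl,
      show ([y0] : List Int).getLastD 0 = y0 from rfl, pvMapHead_id, List.nil_append]
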